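-- pv_equiv track=rewrite | github.com/Youngseo-Jeon0313/baekjoon | 문해기과제2.py | count_coprime
-- ===== SOURCE A (Python) =====
-- def count_coprime(A, B, N):
--     ans = B - A + 1
--     for prime in range(2, N + 1):
--         if N % prime == 0:
--             # prime이 N의 약수인 경우, prime의 배수를 제외
--             for i in range((A + prime - 1) // prime, B // prime + 1):
--                 num = i * prime
--                 if A <= num <= B:
--                     ans -= 1
--     return ans
-- ===== SOURCE B (Python) =====
-- def count_coprime(A, B, N):
--     # closed-form count of multiples per divisor instead of enumerating them
--     removed = 0
--     for d in range(2, N + 1):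
--         if N % d == 0:
--             cnt = B // d - (A + d - 1) // d + 1
--             if cnt > 0:
--                 removed += cnt
--     return B - A + 1 - removed
-- ===== Notes on version B (the rewrite author's own statement) =====
-- stated objective: alternative
-- what changed: B replaces A's inner loop that enumerates every multiple of each divisor of N in [A,B] with a closed-form floor-division count per divisor, accumulated and subtracted once at the end.
import Mathlib
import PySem

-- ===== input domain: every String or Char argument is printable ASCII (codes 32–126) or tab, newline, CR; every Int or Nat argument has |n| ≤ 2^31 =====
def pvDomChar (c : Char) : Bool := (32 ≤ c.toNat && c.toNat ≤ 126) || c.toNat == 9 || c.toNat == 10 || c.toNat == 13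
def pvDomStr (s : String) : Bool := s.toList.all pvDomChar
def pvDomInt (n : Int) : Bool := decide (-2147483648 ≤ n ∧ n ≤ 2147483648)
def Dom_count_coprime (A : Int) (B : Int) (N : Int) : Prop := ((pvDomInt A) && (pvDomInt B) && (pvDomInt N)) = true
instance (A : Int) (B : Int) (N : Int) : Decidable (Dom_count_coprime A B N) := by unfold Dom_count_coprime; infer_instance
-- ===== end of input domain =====

-- ===== PORT A =====
-- literal port of A: subtract 1 for every enumerated multiple of each divisor of N in [A,B]
def count_coprime (A : Int) (B : Int) (N : Int) : Int :=
  (PySem.List.pyRange 2 (N + 1) 1).foldl (fun ans prime =>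
    if PySem.Int.mod N prime = 0 then
      (PySem.List.pyRange (PySem.Int.floordiv (A + prime - 1) prime)
          (PySem.Int.floordiv B prime + 1) 1).foldl
        (fun ans i =>
          let num := i * prime
          if A ≤ num ∧ num ≤ B then ans - 1 else ans) ans
    else ans) (B - A + 1)

-- ===== PORT B =====
-- port of B: closed-form count of multiples per divisor, accumulated, subtracted once
def count_coprime_alt (A : Int) (B : Int) (N : Int) : Int :=
  B - A + 1 -
  (PySem.List.pyRange 2 (N + 1) 1).foldl (fun removed d =>
    if PySem.Int.mod N d = 0 then
      let cnt := PySem.Int.floordiv B d - PySem.Int.floordiv (A + d - 1) d + 1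
      if cnt > 0 then removed + cnt else removed
    else removed) 0

-- ===== PRECONDITION & SPEC =====
def Spec_count_coprime (A : Int) (B : Int) (N : Int) (out : Int) : Prop := out = count_coprime_alt A B N
instance (A : Int) (B : Int) (N : Int) (out : Int) : Decidable (Spec_count_coprime A B N out) := by unfold Spec_count_coprime; infer_instance

-- ===== CLAIM (what is proved, stated in full; the proofs are below) =====
def Claim_equal_count_coprime : Prop := ∀ (A : Int) (B : Int) (N : Int), Dom_count_coprime A B N → Spec_count_coprime A B N (count_coprime A B N)

-- ===== LEMMAS AND PROOFS =====

-- a fold that subtracts 1 whenever a (here: always-true) guard holds subtracts the length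
theorem foldl_sub_one_of_all {P : Int → Prop} [DecidablePred P] :
    ∀ (l : List Int) (ans : Int), (∀ x ∈ l, P x) →
      l.foldl (fun a x => if P x then a - 1 else a) ans = ans - l.length := by
  intro l
  induction l with
  | nil => intro ans _; simp
  | cons x xs ih =>
    intro ans h
    have hx : P x := h x (List.mem_cons_self ..)
    simp only [List.foldl_cons, if_pos hx, List.length_cons]
    rw [ih (ans - 1) (fun y hy => h y (List.mem_cons_of_mem _ hy))]
    push_cast; ring

-- guard bounds: for 0 < p, every i in [⌈A/p⌉, B//p] has A ≤ i*p ≤ B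
theorem guard_holds (A B p i : Int) (hp : 0 < p)
    (h1 : PySem.Int.floordiv (A + p - 1) p ≤ i)
    (h2 : i ≤ PySem.Int.floordiv B p) : A ≤ i * p ∧ i * p ≤ B := by
  have e1 := PySem.Int.floordiv_mul_add_mod (A + p - 1) p
  have m1l := PySem.Int.mod_nonneg (A + p - 1) hp
  have m1u := PySem.Int.mod_lt (A + p - 1) hp
  have e2 := PySem.Int.floordiv_mul_add_mod B p
  have m2l := PySem.Int.mod_nonneg B hp
  have m2u := PySem.Int.mod_lt B hp
  constructor
  · have : PySem.Int.floordiv (A + p - 1) p * p ≤ i * p :=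
      mul_le_mul_of_nonneg_right h1 (le_of_lt hp)
    omega
  · have : i * p ≤ PySem.Int.floordiv B p * p :=
      mul_le_mul_of_nonneg_right h2 (le_of_lt hp)
    omega

-- per-divisor: A's inner loop starting from ans equals ans minus B's closed-form count
theorem inner_eq (A B p : Int) (hp : 0 < p) (ans : Int) :
    (PySem.List.pyRange (PySem.Int.floordiv (A + p - 1) p)
        (PySem.Int.floordiv B p + 1) 1).foldl
      (fun ans i =>
        let num := i * p
        if A ≤ num ∧ num ≤ B then ans - 1 else ans) ans
    = ans - (let cnt := PySem.Int.floordiv B p - PySem.Int.floordiv (A + p - 1) p + 1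
             if cnt > 0 then cnt else 0) := by
  set q := PySem.Int.floordiv (A + p - 1) p with hq
  set hi := PySem.Int.floordiv B p + 1 with hhi
  have hall : ∀ x ∈ PySem.List.pyRange q hi 1, A ≤ x * p ∧ x * p ≤ B := by
    intro x hx
    rw [PySem.List.mem_pyRange_one] at hx
    exact guard_holds A B p x hp hx.1 (by omega)
  rw [foldl_sub_one_of_all (P := fun i => A ≤ i * p ∧ i * p ≤ B) _ ans hall,
      PySem.List.length_pyRange_one]
  simp only []
  split_ifs with h <;> omega

-- outer folds: A's running answer plus B's running removed-count is invariant
theorem outer_eq (A B : Int) (N : Int) :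
    ∀ (l : List Int), (∀ p ∈ l, 0 < p) → ∀ (ans r : Int),
      l.foldl (fun ans prime =>
        if PySem.Int.mod N prime = 0 then
          (PySem.List.pyRange (PySem.Int.floordiv (A + prime - 1) prime)
              (PySem.Int.floordiv B prime + 1) 1).foldl
            (fun ans i =>
              let num := i * prime
              if A ≤ num ∧ num ≤ B then ans - 1 else ans) ans
        else ans) ans
      + l.foldl (fun removed d =>
        if PySem.Int.mod N d = 0 then
          let cnt := PySem.Int.floordiv B d - PySem.Int.floordiv (A + d - 1) d + 1
          if cnt > 0 then removed + cnt else removed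
        else removed) r
      = ans + r := by
  intro l
  induction l with
  | nil => intro _ ans r; simp
  | cons p xs ih =>
    intro h ans r
    have hp : 0 < p := h p (List.mem_cons_self ..)
    have hxs : ∀ x ∈ xs, 0 < x := fun x hx => h x (List.mem_cons_of_mem _ hx)
    simp only [List.foldl_cons]
    by_cases hd : PySem.Int.mod N p = 0
    · rw [if_pos hd, if_pos hd, inner_eq A B p hp ans]
      rw [ih hxs]
      simp only []
      split_ifs <;> ring
    · rw [if_neg hd, if_neg hd, ih hxs]

-- ===== VERDICT (by name: the statement is the Claim_ definition above) =====
theorem count_coprime_spec : Claim_equal_count_coprime := by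
  intro A B N _
  unfold Spec_count_coprime count_coprime count_coprime_alt
  have hpos : ∀ p ∈ PySem.List.pyRange 2 (N + 1) 1, 0 < p := by
    intro p hp
    rw [PySem.List.mem_pyRange_one] at hp
    omega
  have h := outer_eq A B N (PySem.List.pyRange 2 (N + 1) 1) hpos (B - A + 1) 0
  omega
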